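-- pv_equiv track=rewrite | github.com/HITESH-235/CP_Club_SST | Sep_04/max_ofSubArrSums.py | subArrays_withMinSum
-- ===== SOURCE A (Python) =====
-- def minSubArray(nums):
--     res = min(nums)
--     total = 0
--     for i in range(len(nums)):
--         total += nums[i]
--         res = min(res, total)
--
--         if total>0:
--             total = 0
--     return res
--
-- def subArrays_withMinSum(nums):
--     sum_ = 0
--     minimum = minSubArray(nums)
--     res = set()
--     start = 0
--     for i in range(len(nums)):
--         sum_ += nums[i]
--         if sum_ == minimum:
--             res.add(tuple(nums[start : i+1]))
--
--         if sum_ > 0: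
--             sum_ = 0
--             start = i+1
--     return res
-- ===== SOURCE B (Python) =====
-- def subArrays_withMinSum(nums):
--     sum_ = 0
--     start = 0
--     best = None
--     spans = []
--     for i, x in enumerate(nums):
--         sum_ += x
--         if best is None or sum_ < best:
--             best = sum_
--             spans = [(start, i + 1)]
--         elif sum_ == best:
--             spans.append((start, i + 1))
--         if sum_ > 0:
--             sum_ = 0
--             start = i + 1
--     return {tuple(nums[a:b]) for a, b in spans}
-- ===== Notes on version B (the rewrite author's own statement) =====
-- stated objective: alternative
-- what changed: B makes a single pass that tracks the minimum running sum and keeps only (start,end) index spans of the segments currently attaining it, materializing the tuples once at the end, instead of A's two passes (a min-finding pass via minSubArray, then a rescanning pass that builds each matching tuple); B relies on min(nums) being redundant since every running total is <= its element.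
import Mathlib
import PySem

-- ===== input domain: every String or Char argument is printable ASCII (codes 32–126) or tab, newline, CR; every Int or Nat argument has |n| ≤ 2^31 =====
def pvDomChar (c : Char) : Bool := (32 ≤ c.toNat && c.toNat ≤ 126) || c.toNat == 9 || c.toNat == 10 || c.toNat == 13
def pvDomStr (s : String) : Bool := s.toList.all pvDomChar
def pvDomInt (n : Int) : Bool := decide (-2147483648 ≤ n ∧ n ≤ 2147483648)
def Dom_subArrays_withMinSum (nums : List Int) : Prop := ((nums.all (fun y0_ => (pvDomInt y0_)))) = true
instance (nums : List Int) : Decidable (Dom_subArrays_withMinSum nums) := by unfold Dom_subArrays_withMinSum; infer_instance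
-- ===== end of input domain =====

-- B: a single pass tracking the minimum running sum and (start,end) spans of the segments attaining it
-- (tuples built once at the end), instead of A's min-finding pass followed by a rescanning collection pass.


-- ===== PORT A =====
def pvMinSubArray (nums : List Int) : Int :=
  let res0 := (PySem.List.min? nums (fun x => x)).getD 0   -- min(nums); raises on [] (excluded by Pre_)
  let st := (PySem.List.pyRange 0 (nums.length : Int) 1).foldl
    (fun (s : Int × Int) i =>
      let total := s.2 + PySem.List.pyGetD nums i 0
      let res := min s.1 total
      if total > 0 then (res, 0) else (res, total))
    (res0, 0)
  st.1

def subArrays_withMinSum (nums : List Int) : List (List Int) :=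
  let minimum := pvMinSubArray nums
  let st := (PySem.List.pyRange 0 (nums.length : Int) 1).foldl
    (fun (s : Int × PySem.Set (List Int) × Int) i =>
      let sum_ := s.1 + PySem.List.pyGetD nums i 0
      let res := if sum_ = minimum then
          PySem.Set.add s.2.1 (PySem.List.slice nums (some s.2.2) (some (i + 1)))
        else s.2.1
      if sum_ > 0 then (0, res, i + 1) else (sum_, res, s.2.2))
    (0, PySem.Set.empty, 0)
  st.2.1

-- ===== PORT B =====
def subArrays_withMinSum_alt (nums : List Int) : List (List Int) :=
  let st := (PySem.List.enumerate nums 0).foldl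
    (fun (s : Int × Int × Option Int × List (Int × Int)) p =>
      let sum_ := s.1 + p.2
      let bs : Option Int × List (Int × Int) :=
        match s.2.2.1 with
        | none => (some sum_, [(s.2.1, p.1 + 1)])
        | some b =>
          if sum_ < b then (some sum_, [(s.2.1, p.1 + 1)])
          else if sum_ = b then (some b, s.2.2.2 ++ [(s.2.1, p.1 + 1)])
          else (some b, s.2.2.2)
      if sum_ > 0 then (0, p.1 + 1, bs.1, bs.2) else (sum_, s.2.1, bs.1, bs.2))
    (0, 0, none, [])
  PySem.Set.ofList (st.2.2.2.map (fun q => PySem.List.slice nums (some q.1) (some q.2)))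

-- ===== PRECONDITION & SPEC =====
-- Pre_ excludes only the empty list, on which A raises ValueError (min() of an empty sequence).
def Pre_subArrays_withMinSum (nums : List Int) : Prop := nums ≠ []
instance (nums : List Int) : Decidable (Pre_subArrays_withMinSum nums) := by unfold Pre_subArrays_withMinSum; infer_instance
def pvWitness_subArrays_withMinSum : List Int := ([1, -2, 3])

def Spec_subArrays_withMinSum (nums : List Int) (out : List (List Int)) : Prop := out = subArrays_withMinSum_alt nums
instance (nums : List Int) (out : List (List Int)) : Decidable (Spec_subArrays_withMinSum nums out) := by unfold Spec_subArrays_withMinSum; infer_instance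

-- ===== CLAIM (what is proved, stated in full; the proofs are below) =====
def Claim_equal_subArrays_withMinSum : Prop := ∀ (nums : List Int), Dom_subArrays_withMinSum nums → Pre_subArrays_withMinSum nums → Spec_subArrays_withMinSum nums (subArrays_withMinSum nums)

-- ===== LEMMAS AND PROOFS =====

lemma pvRng_succ (k : Nat) :
    PySem.List.pyRange 0 ((k : Nat) + 1 : Nat) 1 = PySem.List.pyRange 0 (k : Int) 1 ++ [(k : Int)] := by
  push_cast; exact PySem.List.pyRange_one_succ_right (by positivity)

-- prefix-state functions: the same folds as the ports, stopped after k steps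
def stMin (nums : List Int) (res0 : Int) (k : Nat) : Int × Int :=
  (PySem.List.pyRange 0 (k : Int) 1).foldl
    (fun (s : Int × Int) i =>
      let total := s.2 + PySem.List.pyGetD nums i 0
      let res := min s.1 total
      if total > 0 then (res, 0) else (res, total))
    (res0, 0)

def stA (nums : List Int) (M : Int) (k : Nat) : Int × PySem.Set (List Int) × Int :=
  (PySem.List.pyRange 0 (k : Int) 1).foldl
    (fun (s : Int × PySem.Set (List Int) × Int) i =>
      let sum_ := s.1 + PySem.List.pyGetD nums i 0
      let res := if sum_ = M then
          PySem.Set.add s.2.1 (PySem.List.slice nums (some s.2.2) (some (i + 1)))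
        else s.2.1
      if sum_ > 0 then (0, res, i + 1) else (sum_, res, s.2.2))
    (0, PySem.Set.empty, 0)

def stB (nums : List Int) (k : Nat) : Int × Int × Option Int × List (Int × Int) :=
  (PySem.List.pyRange 0 (k : Int) 1).foldl
    (fun (s : Int × Int × Option Int × List (Int × Int)) j =>
      let sum_ := s.1 + PySem.List.pyGetD nums j 0
      let bs : Option Int × List (Int × Int) :=
        match s.2.2.1 with
        | none => (some sum_, [(s.2.1, j + 1)])
        | some b =>
          if sum_ < b then (some sum_, [(s.2.1, j + 1)])
          else if sum_ = b then (some b, s.2.2.2 ++ [(s.2.1, j + 1)])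
          else (some b, s.2.2.2)
      if sum_ > 0 then (0, j + 1, bs.1, bs.2) else (sum_, s.2.1, bs.1, bs.2))
    (0, 0, none, [])

lemma pvMinSubArray_eq_stMin (nums : List Int) :
    pvMinSubArray nums = (stMin nums ((PySem.List.min? nums (fun x => x)).getD 0) nums.length).1 := rfl

lemma subArrays_eq_stA (nums : List Int) :
    subArrays_withMinSum nums = (stA nums (pvMinSubArray nums) nums.length).2.1 := rfl

lemma alt_eq_stB (nums : List Int) :
    subArrays_withMinSum_alt nums =
      PySem.Set.ofList ((stB nums nums.length).2.2.2.map
        (fun q => PySem.List.slice nums (some q.1) (some q.2))) := by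
  unfold subArrays_withMinSum_alt stB
  rw [PySem.List.enumerate_eq_map_pyRange nums 0, List.foldl_map, PySem.List.len_eq]

-- peel the last index off each prefix state
lemma stMin_succ (nums : List Int) (res0 : Int) (k : Nat) :
    stMin nums res0 (k + 1) =
      (let s := stMin nums res0 k
       let total := s.2 + PySem.List.pyGetD nums (k : Int) 0
       let res := min s.1 total
       if total > 0 then (res, 0) else (res, total)) := by
  unfold stMin; rw [pvRng_succ, List.foldl_append]; rfl

lemma stA_succ (nums : List Int) (M : Int) (k : Nat) :
    stA nums M (k + 1) =
      (let s := stA nums M k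
       let sum_ := s.1 + PySem.List.pyGetD nums (k : Int) 0
       let res := if sum_ = M then
           PySem.Set.add s.2.1 (PySem.List.slice nums (some s.2.2) (some ((k : Int) + 1)))
         else s.2.1
       if sum_ > 0 then (0, res, (k : Int) + 1) else (sum_, res, s.2.2)) := by
  unfold stA; rw [pvRng_succ, List.foldl_append]; rfl

lemma stB_succ (nums : List Int) (k : Nat) :
    stB nums (k + 1) =
      (let s := stB nums k
       let sum_ := s.1 + PySem.List.pyGetD nums (k : Int) 0
       let bs : Option Int × List (Int × Int) :=
         match s.2.2.1 with
         | none => (some sum_, [(s.2.1, (k : Int) + 1)])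
         | some b =>
           if sum_ < b then (some sum_, [(s.2.1, (k : Int) + 1)])
           else if sum_ = b then (some b, s.2.2.2 ++ [(s.2.1, (k : Int) + 1)])
           else (some b, s.2.2.2)
       if sum_ > 0 then (0, (k : Int) + 1, bs.1, bs.2) else (sum_, s.2.1, bs.1, bs.2)) := by
  unfold stB; rw [pvRng_succ, List.foldl_append]; rfl

-- the joint loop invariant
lemma invariant (nums : List Int) (M res0 : Int) (k : Nat) :
    (stA nums M k).1 = (stB nums k).1 ∧
    (stA nums M k).2.2 = (stB nums k).2.1 ∧
    (stA nums M k).1 ≤ 0 ∧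
    (stMin nums res0 k).2 = (stA nums M k).1 ∧
    ((stB nums k).2.2.1 = none → k = 0 ∧ (stMin nums res0 k).1 = res0 ∧ (stA nums M k).2.1 = []) ∧
    (∀ v, (stB nums k).2.2.1 = some v →
      (stMin nums res0 k).1 = min res0 v ∧
      (∀ j : Nat, j < k → v ≤ nums.getD j 0) ∧
      (M < v → (stA nums M k).2.1 = []) ∧
      (M = v → (stA nums M k).2.1 =
        PySem.Set.ofList ((stB nums k).2.2.2.map
          (fun q => PySem.List.slice nums (some q.1) (some q.2))))) := by
  induction k with
  | zero =>
    simp [stA, stB, stMin, PySem.List.pyRange_one_eq_nil (le_refl 0)]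
  | succ k ih =>
    obtain ⟨h1, h2, h3, h4, h5, h6⟩ := ih
    rw [stA_succ, stB_succ, stMin_succ]
    dsimp only
    rw [← h1, ← h2, h4]
    have hgk : PySem.List.pyGetD nums (k : Int) 0 = nums.getD k 0 :=
      PySem.List.pyGetD_natCast nums k 0
    set g := PySem.List.pyGetD nums (k : Int) 0 with hg
    set s' := (stA nums M k).1 + g with hs'
    set sl := PySem.List.slice nums (some (stA nums M k).2.2) (some ((k : Int) + 1)) with hsl
    cases hbb : (stB nums k).2.2.1 with
    | none =>
      obtain ⟨hk0, hm0, hres0⟩ := h5 hbb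
      have hA1 : (if s' = M then PySem.Set.add (stA nums M k).2.1 sl else (stA nums M k).2.1) =
          (if s' = M then [sl] else (stA nums M k).2.1) := by
        by_cases hsm : s' = M
        · simp [hsm, hres0, PySem.Set.add]
        · simp [hsm]
      have h56 : ∀ v, (some s' : Option Int) = some v →
          min (stMin nums res0 k).1 s' = min res0 v ∧
          (∀ j : Nat, j < k + 1 → v ≤ nums.getD j 0) ∧
          (M < v → (if s' = M then [sl] else (stA nums M k).2.1) = []) ∧
          (M = v → (if s' = M then [sl] else (stA nums M k).2.1) =
            PySem.Set.ofList ([((stA nums M k).2.2, (k : Int) + 1)].map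
              (fun q => PySem.List.slice nums (some q.1) (some q.2)))) := by
        intro v hv
        have hvs : v = s' := by injection hv with h; omega
        subst hvs
        refine ⟨by rw [hm0], ?_, ?_, ?_⟩
        · intro j hj
          have : j = k := by omega
          subst this
          rw [← hgk]
          omega
        · intro hlt
          rw [if_neg (by omega), hres0]
        · intro hme
          rw [if_pos hme.symm]
          simp [PySem.Set.ofList, PySem.Set.add, ← hsl]
      by_cases hpos : s' > 0
      · simp only [if_pos hpos, hA1]
        exact ⟨trivial, trivial, le_refl 0, trivial, by intro h; simp at h, h56⟩
      · simp only [if_neg hpos, hA1]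
        exact ⟨trivial, trivial, by omega, trivial, by intro h; simp at h, h56⟩
    | some w =>
      obtain ⟨hmw, hwb, hnil, heqw⟩ := h6 w hbb
      by_cases hsw : s' < w
      · -- new strict minimum: spans reset
        simp only [if_pos hsw]
        have hA1 : (if s' = M then PySem.Set.add (stA nums M k).2.1 sl else (stA nums M k).2.1) =
            (if s' = M then [sl] else (stA nums M k).2.1) := by
          by_cases hsm : s' = M
          · rw [hnil (by omega)]
            simp [hsm, PySem.Set.add]
          · simp [hsm]
        have h56 : ∀ v, (some s' : Option Int) = some v →
            min (stMin nums res0 k).1 s' = min res0 v ∧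
            (∀ j : Nat, j < k + 1 → v ≤ nums.getD j 0) ∧
            (M < v → (if s' = M then [sl] else (stA nums M k).2.1) = []) ∧
            (M = v → (if s' = M then [sl] else (stA nums M k).2.1) =
              PySem.Set.ofList ([((stA nums M k).2.2, (k : Int) + 1)].map
                (fun q => PySem.List.slice nums (some q.1) (some q.2)))) := by
          intro v hv
          have hvs : v = s' := by injection hv with h; omega
          subst hvs
          refine ⟨?_, ?_, ?_, ?_⟩
          · rw [hmw]
            rcases min_cases res0 w with ⟨h, _⟩ | ⟨h, _⟩ <;> rw [h] <;> omega
          · intro j hj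
            rcases Nat.lt_succ_iff_lt_or_eq.mp hj with hjk | hjk
            · have := hwb j hjk
              omega
            · subst hjk
              rw [← hgk]
              omega
          · intro hlt
            rw [if_neg (by omega)]
            exact hnil (by omega)
          · intro hme
            rw [if_pos hme.symm]
            simp [PySem.Set.ofList, PySem.Set.add, ← hsl]
        by_cases hpos : s' > 0
        · simp only [if_pos hpos, hA1]
          exact ⟨trivial, trivial, le_refl 0, trivial, by intro h; simp at h, h56⟩
        · simp only [if_neg hpos, hA1]
          exact ⟨trivial, trivial, by omega, trivial, by intro h; simp at h, h56⟩
      · by_cases hse : s' = w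
        · -- equal to current minimum: span appended
          simp only [if_neg hsw, if_pos hse]
          have h56 : ∀ v, (some w : Option Int) = some v →
              min (stMin nums res0 k).1 s' = min res0 v ∧
              (∀ j : Nat, j < k + 1 → v ≤ nums.getD j 0) ∧
              (M < v → (if s' = M then PySem.Set.add (stA nums M k).2.1 sl else (stA nums M k).2.1) = []) ∧
              (M = v → (if s' = M then PySem.Set.add (stA nums M k).2.1 sl else (stA nums M k).2.1) =
                PySem.Set.ofList (((stB nums k).2.2.2 ++ [((stA nums M k).2.2, (k : Int) + 1)]).map
                  (fun q => PySem.List.slice nums (some q.1) (some q.2)))) := by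
            intro v hv
            have hvs : v = w := by injection hv with h; omega
            subst hvs
            refine ⟨by rw [hmw]; rcases min_cases res0 v with ⟨h, _⟩ | ⟨h, _⟩ <;> rw [h] <;> omega, ?_, ?_, ?_⟩
            · intro j hj
              rcases Nat.lt_succ_iff_lt_or_eq.mp hj with hjk | hjk
              · exact hwb j hjk
              · subst hjk
                rw [← hgk]
                omega
            · intro hlt
              rw [if_neg (by omega)]
              exact hnil hlt
            · intro hme
              rw [if_pos (by omega)]
              simp only [List.map_append, List.map_cons, List.map_nil]
              rw [PySem.Set.ofList_append_singleton, ← heqw hme, ← hsl]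
          by_cases hpos : s' > 0
          · simp only [if_pos hpos]
            exact ⟨trivial, trivial, le_refl 0, trivial, by intro h; simp at h, h56⟩
          · simp only [if_neg hpos]
            exact ⟨trivial, trivial, by omega, trivial, by intro h; simp at h, h56⟩
        · -- above the current minimum: B records nothing; A records nothing either
          simp only [if_neg hsw, if_neg hse]
          have h56 : ∀ v, (some w : Option Int) = some v →
              min (stMin nums res0 k).1 s' = min res0 v ∧
              (∀ j : Nat, j < k + 1 → v ≤ nums.getD j 0) ∧
              (M < v → (if s' = M then PySem.Set.add (stA nums M k).2.1 sl else (stA nums M k).2.1) = []) ∧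
              (M = v → (if s' = M then PySem.Set.add (stA nums M k).2.1 sl else (stA nums M k).2.1) =
                PySem.Set.ofList ((stB nums k).2.2.2.map
                  (fun q => PySem.List.slice nums (some q.1) (some q.2)))) := by
            intro v hv
            have hvs : v = w := by injection hv with h; omega
            subst hvs
            refine ⟨?_, ?_, ?_, ?_⟩
            · rw [hmw]
              rcases min_cases res0 v with ⟨h, _⟩ | ⟨h, _⟩ <;> rw [h] <;> omega
            · intro j hj
              rcases Nat.lt_succ_iff_lt_or_eq.mp hj with hjk | hjk
              · exact hwb j hjk
              · subst hjk
                rw [← hgk]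
                omega
            · intro hlt
              rw [if_neg (by omega)]
              exact hnil hlt
            · intro hme
              rw [if_neg (by omega)]
              exact heqw hme
          by_cases hpos : s' > 0
          · simp only [if_pos hpos]
            exact ⟨trivial, trivial, le_refl 0, trivial, by intro h; simp at h, h56⟩
          · simp only [if_neg hpos]
            exact ⟨trivial, trivial, by omega, trivial, by intro h; simp at h, h56⟩
      

theorem main_equal (nums : List Int) (hne : nums ≠ []) :
    subArrays_withMinSum nums = subArrays_withMinSum_alt nums := by
  rw [subArrays_eq_stA, alt_eq_stB]
  cases hm : PySem.List.min? nums (fun x => x) with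
  | none => exact absurd ((PySem.List.min?_eq_none_iff nums (fun x => x)).mp hm) hne
  | some r0 =>
    have hM : pvMinSubArray nums = (stMin nums r0 nums.length).1 := by
      rw [pvMinSubArray_eq_stMin, hm]
      rfl
    obtain ⟨h1, h2, h3, h4, h5, h6⟩ :=
      invariant nums (pvMinSubArray nums) r0 nums.length
    cases hbb : (stB nums nums.length).2.2.1 with
    | none =>
      have := (h5 hbb).1
      exact absurd (List.eq_nil_of_length_eq_zero this) hne
    | some v =>
      obtain ⟨hmv, hvb, _, heq⟩ := h6 v hbb
      have hvr : v ≤ r0 := by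
        have hmem : r0 ∈ nums := PySem.List.min?_mem hm
        obtain ⟨j, hj, hjv⟩ := List.mem_iff_getElem.mp hmem
        have := hvb j hj
        rwa [List.getD_eq_getElem nums 0 hj, hjv] at this
      have hMv : pvMinSubArray nums = v := by
        rw [hM, hmv]
        omega
      exact heq hMv

-- ===== VERDICT (by name: the statement is the Claim_ definition above) =====
theorem subArrays_withMinSum_spec : Claim_equal_subArrays_withMinSum := by
  intro nums _ hpre
  exact main_equal nums hpre
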